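-- pv_equiv track=rewrite | github.com/oristides/splitwisecli | skill/evals/eval_runner.py | tokenize
-- ===== SOURCE A (Python) =====
-- def tokenize(cmd: str) -> set[str]:
--     """
--     Split a CLI command into a set of tokens for order-independent flag matching.
--     'splitwisecli expense create --friend 456 -c 100'
--     → {'splitwisecli', 'expense', 'create', '--friend 456', '-c 100'}
--     Paired flags (--flag value) are kept together.
--     """
--     tokens = set()
--     parts  = cmd.strip().split()
--     i      = 0
--     while i < len(parts):
--         part = parts[i]
--         if part.startswith("-") and i + 1 < len(parts) and not parts[i+1].startswith("-"):
--             tokens.add(f"{part} {parts[i+1]}")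
--             i += 2
--         else:
--             tokens.add(part)
--             i += 1
--     return tokens
-- ===== SOURCE B (Python) =====
-- def tokenize(cmd: str) -> set[str]:
--     """Single for-loop with a deferred 'pending flag' instead of index lookahead."""
--     tokens = set()
--     pending = None
--     for part in cmd.strip().split():
--         if pending is not None:
--             if part.startswith("-"):
--                 tokens.add(pending)
--                 pending = part
--             else:
--                 tokens.add(f"{pending} {part}")
--                 pending = None
--         elif part.startswith("-"):
--             pending = part
--         else:
--             tokens.add(part)
--     if pending is not None:
--         tokens.add(pending)
--     return tokens
-- ===== Notes on version B (the rewrite author's own statement) =====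
-- stated objective: idiomatic
-- what changed: Replaces the index-jumping while-loop with lookahead parts[i+1] by a single for-loop that carries a deferred-flag state variable forward and emits it when the next token (or end of input) is seen.
import Mathlib
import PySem

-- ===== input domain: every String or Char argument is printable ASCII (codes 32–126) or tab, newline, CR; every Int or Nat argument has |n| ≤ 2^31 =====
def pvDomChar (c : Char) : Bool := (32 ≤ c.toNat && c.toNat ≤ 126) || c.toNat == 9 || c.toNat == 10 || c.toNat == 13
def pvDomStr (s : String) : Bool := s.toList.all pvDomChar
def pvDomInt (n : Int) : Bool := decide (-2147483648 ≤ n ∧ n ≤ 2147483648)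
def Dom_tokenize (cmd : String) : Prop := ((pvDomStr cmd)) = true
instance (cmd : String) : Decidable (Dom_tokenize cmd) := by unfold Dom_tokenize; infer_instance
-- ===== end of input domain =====

-- B replaces A's index-jumping while-loop (lookahead at parts[i+1]) by a single pass that
-- carries a pending flag forward; objective: idiomatic. Return value compared (Python returns a set).

-- ===== PORT A =====
-- the while-loop over index i, transcribed as recursion on the remaining parts:
-- `p :: q :: rest` is the state where i+1 < len(parts) (lookahead q available).
def tokenizeLoopA : List String → PySem.Set String → PySem.Set String
  | [], tokens => tokens
  | [p], tokens => tokenizeLoopA [] (PySem.Set.add tokens p)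
  | p :: q :: rest, tokens =>
      if PySem.Str.startswith p "-" && !(PySem.Str.startswith q "-") then
        tokenizeLoopA rest (PySem.Set.add tokens (p ++ " " ++ q))
      else
        tokenizeLoopA (q :: rest) (PySem.Set.add tokens p)

def tokenize (cmd : String) : List String :=
  tokenizeLoopA (PySem.Str.split₀ (PySem.Str.strip cmd)) PySem.Set.empty

-- ===== PORT B =====
-- one for-loop step over (tokens, pending)
def tokenizeStepB (st : PySem.Set String × Option String) (part : String) :
    PySem.Set String × Option String :=
  match st with
  | (tokens, some pending) =>
      if PySem.Str.startswith part "-" then (PySem.Set.add tokens pending, some part)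
      else (PySem.Set.add tokens (pending ++ " " ++ part), none)
  | (tokens, none) =>
      if PySem.Str.startswith part "-" then (tokens, some part)
      else (PySem.Set.add tokens part, none)

-- after the loop: flush the pending flag, if any
def tokenizeFinishB (st : PySem.Set String × Option String) : PySem.Set String :=
  match st with
  | (tokens, some pending) => PySem.Set.add tokens pending
  | (tokens, none) => tokens

def tokenize_alt (cmd : String) : List String :=
  tokenizeFinishB
    ((PySem.Str.split₀ (PySem.Str.strip cmd)).foldl tokenizeStepB (PySem.Set.empty, none))

-- ===== PRECONDITION & SPEC =====
def Spec_tokenize (cmd : String) (out : List String) : Prop := out = tokenize_alt cmd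
instance (cmd : String) (out : List String) : Decidable (Spec_tokenize cmd out) := by unfold Spec_tokenize; infer_instance

-- ===== CLAIM (what is proved, stated in full; the proofs are below) =====
def Claim_equal_tokenize : Prop := ∀ (cmd : String), Dom_tokenize cmd → Spec_tokenize cmd (tokenize cmd)

-- ===== LEMMAS AND PROOFS =====

-- Core invariant: B's fold with pending state `none` tracks A's loop; with pending `some f`
-- it tracks A's loop restarted at the not-yet-emitted flag f.
theorem tokenize_loop_eq : ∀ (parts : List String) (tokens : PySem.Set String),
    tokenizeFinishB (parts.foldl tokenizeStepB (tokens, none)) = tokenizeLoopA parts tokens ∧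
    ∀ f : String, PySem.Str.startswith f "-" = true →
      tokenizeFinishB (parts.foldl tokenizeStepB (tokens, some f)) =
        tokenizeLoopA (f :: parts) tokens := by
  intro parts
  induction parts with
  | nil =>
      intro tokens
      refine ⟨rfl, ?_⟩
      intro f hf
      simp [tokenizeFinishB, tokenizeLoopA]
  | cons p rest ih =>
      intro tokens
      constructor
      · by_cases hp : PySem.Chars.startswith p.toList ['-'] = true
        · rw [List.foldl,
            show tokenizeStepB (tokens, none) p = (tokens, some p) by
              simp [tokenizeStepB, hp]]
          have := (ih tokens).2 p (by simpa using hp)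
          exact this
        · rw [List.foldl,
            show tokenizeStepB (tokens, none) p = (PySem.Set.add tokens p, none) by
              simp [tokenizeStepB, hp]]
          rw [(ih (PySem.Set.add tokens p)).1]
          cases rest with
          | nil => simp [tokenizeLoopA]
          | cons q r => simp [tokenizeLoopA, hp]
      · intro f hf
        by_cases hp : PySem.Chars.startswith p.toList ['-'] = true
        · -- flag after flag: B emits f alone, A's condition is false
          rw [List.foldl,
            show tokenizeStepB (tokens, some f) p = (PySem.Set.add tokens f, some p) by
              simp [tokenizeStepB, hp]]
          rw [(ih (PySem.Set.add tokens f)).2 p (by simpa using hp)]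
          simp [tokenizeLoopA, hp]
        · -- value after flag: B emits the pair, A's condition is true
          rw [List.foldl,
            show tokenizeStepB (tokens, some f) p
                = (PySem.Set.add tokens (f ++ " " ++ p), none) by
              simp [tokenizeStepB, hp]]
          rw [(ih (PySem.Set.add tokens (f ++ " " ++ p))).1]
          have hf' : PySem.Chars.startswith f.toList ['-'] = true := by simpa using hf
          simp [tokenizeLoopA, hf', hp]

-- ===== VERDICT (by name: the statement is the Claim_ definition above) =====
theorem tokenize_spec : Claim_equal_tokenize := by
  intro cmd _
  unfold Spec_tokenize tokenize tokenize_alt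
  exact ((tokenize_loop_eq (PySem.Str.split₀ (PySem.Str.strip cmd)) PySem.Set.empty).1).symm
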